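-- pv_equiv track=rewrite | github.com/fresnel-uv/research_projects | total_equitable-nonincident.py | filter_T_sets_by_size_proximity
-- ===== SOURCE A (Python) =====
-- def filter_T_sets_by_size_proximity(T_sets):
--     T_sizes = [len(V_i) + len(E_i) for (_, _, V_i, E_i) in T_sets]
--     filtered_T = []
--
--     for idx, (i, j, V_i, E_i) in enumerate(T_sets):
--         size_i = T_sizes[idx]
--         if any(abs(size_i - size_j) <= 1 for k, size_j in enumerate(T_sizes) if k != idx):
--             filtered_T.append((i, j, V_i, E_i))
--
--     return filtered_T
-- ===== SOURCE B (Python) =====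
-- def filter_T_sets_by_size_proximity(T_sets):
--     counts = {}
--     for (_, _, V_i, E_i) in T_sets:
--         s = len(V_i) + len(E_i)
--         counts[s] = counts.get(s, 0) + 1
--     result = []
--     for (i, j, V_i, E_i) in T_sets:
--         s = len(V_i) + len(E_i)
--         if counts.get(s, 0) > 1 or counts.get(s - 1, 0) > 0 or counts.get(s + 1, 0) > 0:
--             result.append((i, j, V_i, E_i))
--     return result
-- ===== Notes on version B (the rewrite author's own statement) =====
-- stated objective: alternative
-- what changed: Replaces A's per-element scan over all other indices by a one-pass size counter dict: an element with size s qualifies iff count(s) > 1 or count(s-1) > 0 or count(s+1) > 0.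
import Mathlib
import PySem

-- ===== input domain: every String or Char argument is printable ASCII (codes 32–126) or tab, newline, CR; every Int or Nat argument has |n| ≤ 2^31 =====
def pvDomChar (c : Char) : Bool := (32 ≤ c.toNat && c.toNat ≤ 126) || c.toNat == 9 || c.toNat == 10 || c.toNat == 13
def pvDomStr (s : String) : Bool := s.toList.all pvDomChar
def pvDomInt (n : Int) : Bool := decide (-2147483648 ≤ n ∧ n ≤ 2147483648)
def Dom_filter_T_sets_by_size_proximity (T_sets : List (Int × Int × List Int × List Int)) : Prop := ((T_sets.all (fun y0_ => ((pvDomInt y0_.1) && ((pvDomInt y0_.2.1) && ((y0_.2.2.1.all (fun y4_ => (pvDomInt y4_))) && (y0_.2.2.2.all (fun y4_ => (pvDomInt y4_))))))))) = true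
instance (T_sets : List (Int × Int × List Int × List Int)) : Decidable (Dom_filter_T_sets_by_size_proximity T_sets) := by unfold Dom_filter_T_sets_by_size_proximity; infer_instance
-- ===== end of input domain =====

-- B replaces A's per-element scan over all other indices by a one-pass size counter:
-- an element with size s qualifies iff count(s) > 1 or count(s-1) > 0 or count(s+1) > 0
-- (objective: alternative).

-- shared size helper: len(V_i) + len(E_i)
def pvSize (t : Int × Int × List Int × List Int) : Int :=
  (t.2.2.1.length : Int) + (t.2.2.2.length : Int)

-- ===== PORT A =====
def filter_T_sets_by_size_proximity (T_sets : List (Int × Int × List Int × List Int)) : List (Int × Int × List Int × List Int) :=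
  let T_sizes : List Int := T_sets.map pvSize
  (PySem.List.enumerate T_sets 0).foldl (fun acc p =>
    let size_i := PySem.List.pyGetD T_sizes p.1 0
    if (PySem.List.enumerate T_sizes 0).any
        (fun q => decide (q.1 ≠ p.1) && decide (|size_i - q.2| ≤ 1))
    then acc ++ [p.2] else acc) []

-- ===== PORT B =====
def filter_T_sets_by_size_proximity_alt (T_sets : List (Int × Int × List Int × List Int)) : List (Int × Int × List Int × List Int) :=
  let counts : PySem.Dict Int Int :=
    T_sets.foldl (fun d t => d.insert (pvSize t) (d.getD (pvSize t) 0 + 1)) PySem.Dict.empty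
  T_sets.filter (fun t =>
    decide (1 < counts.getD (pvSize t) 0) ||
    decide (0 < counts.getD (pvSize t - 1) 0) ||
    decide (0 < counts.getD (pvSize t + 1) 0))

-- ===== PRECONDITION & SPEC =====
def Spec_filter_T_sets_by_size_proximity (T_sets : List (Int × Int × List Int × List Int)) (out : List (Int × Int × List Int × List Int)) : Prop := out = filter_T_sets_by_size_proximity_alt T_sets
instance (T_sets : List (Int × Int × List Int × List Int)) (out : List (Int × Int × List Int × List Int)) : Decidable (Spec_filter_T_sets_by_size_proximity T_sets out) := by unfold Spec_filter_T_sets_by_size_proximity; infer_instance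

-- ===== CLAIM (what is proved, stated in full; the proofs are below) =====
def Claim_equal_filter_T_sets_by_size_proximity : Prop := ∀ (T_sets : List (Int × Int × List Int × List Int)), Dom_filter_T_sets_by_size_proximity T_sets → Spec_filter_T_sets_by_size_proximity T_sets (filter_T_sets_by_size_proximity T_sets)

-- ===== LEMMAS AND PROOFS =====

-- two distinct positions with the same value force count > 1
theorem pv_count_gt_one {l : List Int} {v : Int} {k j : Nat} (hk : k < l.length)
    (hj : j < l.length) (hne : k ≠ j) (h1 : l[k] = v) (h2 : l[j] = v) : 1 < l.count v := by
  induction l generalizing k j with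
  | nil => simp at hk
  | cons x t ih =>
    match k, j with
    | 0, 0 => exact absurd rfl hne
    | 0, j+1 =>
      simp only [List.getElem_cons_zero] at h1
      simp only [List.getElem_cons_succ] at h2
      have hmem : v ∈ t := h2 ▸ List.getElem_mem _
      have := List.count_pos_iff.mpr hmem
      simp [h1]
      omega
    | k+1, 0 =>
      simp only [List.getElem_cons_zero] at h2
      simp only [List.getElem_cons_succ] at h1
      have hmem : v ∈ t := h1 ▸ List.getElem_mem _
      have := List.count_pos_iff.mpr hmem
      simp [h2]
      omega
    | k+1, j+1 =>
      simp only [List.getElem_cons_succ] at h1 h2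
      have := ih (by simpa using hk) (by simpa using hj) (by omega) h1 h2
      simp [List.count_cons]
      omega

-- count > 1 gives two distinct positions with that value
theorem pv_two_positions {l : List Int} {v : Int} (h : 1 < l.count v) :
    ∃ n m : Nat, n ≠ m ∧ ∃ hn : n < l.length, ∃ hm : m < l.length, l[n] = v ∧ l[m] = v := by
  induction l with
  | nil => simp at h
  | cons x t ih =>
    by_cases hx : x = v
    · have hc : 0 < t.count v := by subst hx; rw [List.count_cons_self] at h; omega
      obtain ⟨j, hj, hjv⟩ := List.mem_iff_getElem.mp (List.count_pos_iff.mp hc)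
      exact ⟨0, j+1, by omega, by simp, by simpa using hj, by simpa using hx, by simpa using hjv⟩
    · have hc : 1 < t.count v := by simpa [List.count_cons, hx] using h
      obtain ⟨n, m, hnm, hn, hm, h1, h2⟩ := ih hc
      exact ⟨n+1, m+1, by omega, by simpa using hn, by simpa using hm, by simpa using h1, by simpa using h2⟩

-- A's append loop is a filter-then-project
theorem pv_foldl_append_snd {α : Type} (l : List (Int × α)) (p : Int × α → Bool)
    (acc : List α) :
    l.foldl (fun a q => if p q then a ++ [q.2] else a) acc = acc ++ (l.filter p).map (·.2) := by
  induction l generalizing acc with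
  | nil => simp
  | cons q t ih =>
    simp only [List.foldl_cons, List.filter_cons]
    by_cases hp : p q
    · simp [hp, ih]
    · simp [hp, ih]

-- filtering an enumeration by an index-dependent predicate that agrees with g pointwise
theorem pv_filter_enumerate {α : Type} (xs : List α) (s : Int) (p : Int × α → Bool)
    (g : α → Bool) (h : ∀ (k : Nat) (hk : k < xs.length), p (s + (k : Int), xs[k]) = g xs[k]) :
    ((PySem.List.enumerate xs s).filter p).map (·.2) = xs.filter g := by
  induction xs generalizing s with
  | nil => simp [PySem.List.enumerate_nil]
  | cons x t ih =>
    have h0 : p (s, x) = g x := by simpa using h 0 (by simp)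
    have ht := ih (s+1) (fun k hk => by
      have := h (k+1) (by simpa using Nat.succ_lt_succ hk)
      have he : s + ((k+1 : Nat) : Int) = s + 1 + (k : Int) := by push_cast; ring
      rw [he] at this
      simpa using this)
    rw [PySem.List.enumerate_cons]
    simp only [List.filter_cons, h0]
    by_cases hg : g x
    · simp [hg, ht]
    · simp [hg, ht]

-- B's counter dict holds the occurrence counts of the size list
theorem pv_counts_getD (T_sets : List (Int × Int × List Int × List Int)) (v : Int) :
    (T_sets.foldl (fun d t => d.insert (pvSize t) (d.getD (pvSize t) 0 + 1))
      (PySem.Dict.empty : PySem.Dict Int Int)).getD v 0 = ((T_sets.map pvSize).count v : Int) := by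
  have := List.foldl_map (f := pvSize)
    (g := fun (d : PySem.Dict Int Int) (x : Int) => d.insert x (d.getD x 0 + 1))
    (l := T_sets) (init := (PySem.Dict.empty : PySem.Dict Int Int))
  rw [← this, PySem.Dict.getD_foldl_insert_add_one]
  simp [PySem.Dict.getD]

-- the heart: A's "some other index within 1" test equals B's counter test
theorem pv_pointwise (S : List Int) (k : Nat) (hk : k < S.length) :
    ((PySem.List.enumerate S 0).any
      (fun q => decide (q.1 ≠ (k : Int)) && decide (|S[k] - q.2| ≤ 1)))
    = (decide (1 < S.count S[k]) || decide (0 < S.count (S[k] - 1)) ||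
       decide (0 < S.count (S[k] + 1))) := by
  rw [Bool.eq_iff_iff]
  simp only [List.any_eq_true, Bool.and_eq_true, decide_eq_true_eq, Bool.or_eq_true]
  constructor
  · rintro ⟨q, hq, hne, habs⟩
    obtain ⟨j, hj, rfl⟩ := (PySem.List.mem_enumerate_iff S 0 q).mp hq
    simp only [zero_add] at hne habs ⊢
    rw [abs_le] at habs
    have hcases : S[j] = S[k] ∨ S[j] = S[k] - 1 ∨ S[j] = S[k] + 1 := by omega
    have hkj : k ≠ j := fun he => hne (by exact_mod_cast he.symm)
    rcases hcases with h | h | h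
    · exact Or.inl (Or.inl (pv_count_gt_one hk hj hkj rfl h))
    · exact Or.inl (Or.inr (List.count_pos_iff.mpr (h ▸ List.getElem_mem hj)))
    · exact Or.inr (List.count_pos_iff.mpr (h ▸ List.getElem_mem hj))
  · rintro ((h | h) | h)
    · obtain ⟨n, m, hnm, hn, hm, h1, h2⟩ := pv_two_positions h
      by_cases hkn : n = k
      · exact ⟨((m : Int), S[m]), (PySem.List.mem_enumerate_iff S 0 _).mpr ⟨m, hm, by simp⟩,
          by simp; omega, by rw [h2]; simp⟩
      · exact ⟨((n : Int), S[n]), (PySem.List.mem_enumerate_iff S 0 _).mpr ⟨n, hn, by simp⟩,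
          by simp; omega, by rw [h1]; simp⟩
    · obtain ⟨j, hj, hjv⟩ := List.mem_iff_getElem.mp (List.count_pos_iff.mp h)
      have hne : j ≠ k := fun he => by subst he; omega
      exact ⟨((j : Int), S[j]), (PySem.List.mem_enumerate_iff S 0 _).mpr ⟨j, hj, by simp⟩,
        by simp; omega, by rw [hjv]; simp⟩
    · obtain ⟨j, hj, hjv⟩ := List.mem_iff_getElem.mp (List.count_pos_iff.mp h)
      have hne : j ≠ k := fun he => by subst he; omega
      exact ⟨((j : Int), S[j]), (PySem.List.mem_enumerate_iff S 0 _).mpr ⟨j, hj, by simp⟩,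
        by simp; omega, by rw [hjv]; simp⟩

-- the two ports agree on every input
theorem pv_final (T_sets : List (Int × Int × List Int × List Int)) :
    filter_T_sets_by_size_proximity T_sets = filter_T_sets_by_size_proximity_alt T_sets := by
  have hA : filter_T_sets_by_size_proximity T_sets =
      [] ++ (((PySem.List.enumerate T_sets 0).filter
        (fun p => (PySem.List.enumerate (T_sets.map pvSize) 0).any
          (fun q => decide (q.1 ≠ p.1) &&
            decide (|PySem.List.pyGetD (T_sets.map pvSize) p.1 0 - q.2| ≤ 1)))).map (·.2)) :=
    pv_foldl_append_snd (PySem.List.enumerate T_sets 0) _ []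
  have hB : filter_T_sets_by_size_proximity_alt T_sets =
      T_sets.filter (fun t =>
        decide (1 < ((T_sets.map pvSize).count (pvSize t) : Int)) ||
        decide (0 < ((T_sets.map pvSize).count (pvSize t - 1) : Int)) ||
        decide (0 < ((T_sets.map pvSize).count (pvSize t + 1) : Int))) := by
    unfold filter_T_sets_by_size_proximity_alt
    simp only [pv_counts_getD]
  rw [hA, hB, List.nil_append]
  apply pv_filter_enumerate
  intro k hk
  have hk' : k < (T_sets.map pvSize).length := by simpa using hk
  simp only [zero_add]
  rw [show PySem.List.pyGetD (T_sets.map pvSize) ((k : Nat) : Int) 0 = (T_sets.map pvSize)[k] from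
    by simp [PySem.List.pyGetD_natCast, List.getElem?_eq_getElem hk]]
  rw [pv_pointwise _ k hk']
  simp only [List.getElem_map]
  norm_cast

-- ===== VERDICT (by name: the statement is the Claim_ definition above) =====
theorem filter_T_sets_by_size_proximity_spec : Claim_equal_filter_T_sets_by_size_proximity := by
  intro T_sets _
  unfold Spec_filter_T_sets_by_size_proximity
  exact pv_final T_sets
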